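-- pv_equiv track=rewrite | github.com/tmthyjames/gensim | gensim/models/phrases.py | pseudocorpus
-- ===== SOURCE A (Python) =====
-- import itertools as it
--
-- def pseudocorpus(source_vocab, sep, common_terms=frozenset()):
--     """Feeds `source_vocab`'s compound keys back to it, to discover phrases.
--
--     Parameters
--     ----------
--     source_vocab : iterable of list of str
--         Tokens vocabulary.
--     sep : str
--         Separator element.
--     common_terms : set, optional
--         Immutable set of stopwords.
--
--     Yields
--     ------
--     list of str
--         Phrase.
--
--     """
--     for k in source_vocab:
--         if sep not in k:
--             continue
--         unigrams = k.split(sep)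
--         for i in range(1, len(unigrams)):
--             if unigrams[i - 1] not in common_terms:
--                 # do not join common terms
--                 cterms = list(it.takewhile(lambda w: w in common_terms, unigrams[i:]))
--                 tail = unigrams[i + len(cterms):]
--                 components = [sep.join(unigrams[:i])] + cterms
--                 if tail:
--                     components.append(sep.join(tail))
--                 yield components
-- ===== SOURCE B (Python) =====
-- def pseudocorpus(source_vocab, sep, common_terms=frozenset()):
--     """One right-to-left pass precomputes, per split position, the common-term
--     run and the joined tail; one left-to-right pass builds prefix joins
--     incrementally, so no slice is re-joined from scratch."""
--     for k in source_vocab: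
--         if sep not in k:
--             continue
--         u = k.split(sep)
--         n = len(u)
--         # right-to-left pass over u[1:]: per position, common run + joined tail
--         parts = [None] * (n - 1)
--         suf_join = None   # sep.join(u[j:]) for the suffix seen so far
--         run = []          # common-term run starting at the current position
--         tail_join = None  # sep.join of what follows that run, if non-empty
--         for j in range(n - 1, 0, -1):
--             w = u[j]
--             suf_join = w if suf_join is None else w + sep + suf_join
--             if w in common_terms:
--                 run = [w] + run
--             else:
--                 run = []
--                 tail_join = suf_join
--             parts[j - 1] = run + ([tail_join] if tail_join is not None else [])
--         # left-to-right pass: incremental prefix join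
--         prev, prefix = u[0], u[0]
--         for w, p in zip(u[1:], parts):
--             if prev not in common_terms:
--                 yield [prefix] + p
--             prev, prefix = w, prefix + sep + w
-- ===== Notes on version B (the rewrite author's own statement) =====
-- stated objective: alternative
-- what changed: B replaces A's per-position slicing and from-scratch sep.join of prefix and tail with one right-to-left pass that precomputes, for every split position, the common-term run and the joined tail, followed by one left-to-right pass that extends the prefix join incrementally.
-- outside the precondition, e.g. on pseudocorpus(['ab'], '', set()): A raises ValueError, B raises ValueError
import Mathlib
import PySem

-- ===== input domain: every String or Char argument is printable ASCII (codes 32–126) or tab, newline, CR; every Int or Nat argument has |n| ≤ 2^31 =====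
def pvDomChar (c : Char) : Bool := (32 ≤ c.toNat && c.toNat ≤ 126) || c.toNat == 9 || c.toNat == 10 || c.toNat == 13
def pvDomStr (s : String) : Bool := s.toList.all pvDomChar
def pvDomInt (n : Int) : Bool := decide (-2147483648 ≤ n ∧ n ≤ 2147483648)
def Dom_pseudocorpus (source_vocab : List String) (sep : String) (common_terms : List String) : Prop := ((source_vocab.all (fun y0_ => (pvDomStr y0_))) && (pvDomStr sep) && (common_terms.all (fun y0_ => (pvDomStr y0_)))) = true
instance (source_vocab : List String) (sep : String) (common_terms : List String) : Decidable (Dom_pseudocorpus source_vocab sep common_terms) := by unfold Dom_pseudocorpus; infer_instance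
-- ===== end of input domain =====

-- B replaces A's per-position slice-and-rejoin with one right-to-left pass precomputing, per split
-- position, the common-term run and the joined tail, plus one left-to-right pass building prefix
-- joins incrementally (objective: alternative; equal return values, no speed claim).

-- ===== PORT A =====
-- inner loop 'for i in range(1, len(unigrams)): …' of A, as recursion on the index i
def pvAloop (sep : String) (ct : List String) (u : List String) (i : Nat) : List (List String) :=
  if _h : i < u.length then
    (if ct.contains (u.getD (i - 1) "") then []
     else
       let cterms := (u.drop i).takeWhile (fun w => ct.contains w)
       let tail := u.drop (i + cterms.length)
       let components := [PySem.Str.join sep (u.take i)] ++ cterms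
       let components := if tail ≠ [] then components ++ [PySem.Str.join sep tail] else components
       [components])
    ++ pvAloop sep ct u (i + 1)
  else []
termination_by u.length - i

def pseudocorpus (source_vocab : List String) (sep : String) (common_terms : List String) : List (List String) :=
  source_vocab.foldl (fun acc k =>
    if PySem.Str.isIn sep k = false then acc          -- 'if sep not in k: continue'
    else
      match PySem.Str.split? k sep with               -- k.split(sep); none ↔ sep = "" (Python raises; outside Pre_)
      | none => acc
      | some u => acc ++ pvAloop sep common_terms u 1) []

-- ===== PORT B =====
-- right-to-left pass of Source B: for a suffix u[j:] returns
-- (suf_join, run, tail_join, parts-for-each-position-of-the-suffix)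
def pvBright (sep : String) (ct : List String) : List String → Option String × List String × Option String × List (List String)
  | [] => (none, [], none, [])
  | w :: rest =>
    let (sj, run, tj, parts) := pvBright sep ct rest
    let sj' : Option String := some (match sj with | none => w | some s => w ++ sep ++ s)
    let (run', tj') := if ct.contains w then (w :: run, tj) else (([] : List String), sj')
    (sj', run', tj', (run' ++ (match tj' with | none => [] | some t => [t])) :: parts)

-- left-to-right pass of Source B: 'for w, p in zip(u[1:], parts): …' with carried prev / incremental prefix
def pvBleft (sep : String) (ct : List String) : List (String × List String) → String → String → List (List String) → List (List String)
  | [], _, _, acc => acc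
  | (w, p) :: rest, prev, pfx, acc =>
    pvBleft sep ct rest w (pfx ++ sep ++ w) (if ct.contains prev then acc else acc ++ [pfx :: p])

def pseudocorpus_alt (source_vocab : List String) (sep : String) (common_terms : List String) : List (List String) :=
  source_vocab.foldl (fun acc k =>
    if PySem.Str.isIn sep k = false then acc
    else
      match PySem.Str.split? k sep with
      | none => acc
      | some [] => acc                                 -- unreachable: split never returns []
      | some (u0 :: rest) =>
        pvBleft sep common_terms (rest.zip (pvBright sep common_terms rest).2.2.2) u0 u0 acc) []

-- ===== PRECONDITION & SPEC =====
-- Pre_ excludes only sep = "" with a non-empty vocabulary: there Python's k.split(sep) raises ValueError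
-- ('' is a substring of every key), in A and in B alike.
def Pre_pseudocorpus (source_vocab : List String) (sep : String) (common_terms : List String) : Prop :=
  sep ≠ "" ∨ source_vocab = []
instance (source_vocab : List String) (sep : String) (common_terms : List String) : Decidable (Pre_pseudocorpus source_vocab sep common_terms) := by unfold Pre_pseudocorpus; infer_instance

def pvWitness_pseudocorpus : List String × String × List String := (["a_the_b", "c"], "_", ["the"])

def Spec_pseudocorpus (source_vocab : List String) (sep : String) (common_terms : List String) (out : List (List String)) : Prop := out = pseudocorpus_alt source_vocab sep common_terms
instance (source_vocab : List String) (sep : String) (common_terms : List String) (out : List (List String)) : Decidable (Spec_pseudocorpus source_vocab sep common_terms out) := by unfold Spec_pseudocorpus; infer_instance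

-- ===== CLAIM (what is proved, stated in full; the proofs are below) =====
def Claim_equal_pseudocorpus : Prop := ∀ (source_vocab : List String) (sep : String) (common_terms : List String), Dom_pseudocorpus source_vocab sep common_terms → Pre_pseudocorpus source_vocab sep common_terms → Spec_pseudocorpus source_vocab sep common_terms (pseudocorpus source_vocab sep common_terms)

-- ===== LEMMAS AND PROOFS =====

-- join of a non-empty list, as an Option
def pvJoinOpt (sep : String) : List String → Option String
  | [] => none
  | l@(_ :: _) => some (PySem.Str.join sep l)

-- the suffix part of the yield at a position whose suffix is s: common run ++ optional joined tail
def pvPart (sep : String) (ct : List String) (s : List String) : List String :=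
  s.takeWhile (fun w => ct.contains w) ++ (pvJoinOpt sep (s.dropWhile (fun w => ct.contains w))).toList

def pvTails (sep : String) (ct : List String) : List String → List (List String)
  | [] => []
  | w :: r => pvPart sep ct (w :: r) :: pvTails sep ct r

-- common description of what both programs emit, walking the suffix with carried prev token / prefix join
def pvMid (sep : String) (ct : List String) : String → String → List String → List (List String)
  | _, _, [] => []
  | prev, pfx, w :: r =>
    (if ct.contains prev then [] else [pfx :: pvPart sep ct (w :: r)]) ++ pvMid sep ct w (pfx ++ sep ++ w) r

theorem pv_join_singleton (sep w : String) : PySem.Str.join sep [w] = w := by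
  simp [PySem.Str.join, PySem.Chars.join_singleton, String.ofList_toList]

theorem pv_join_cons (sep w : String) (l : List String) (h : l ≠ []) :
    PySem.Str.join sep (w :: l) = w ++ sep ++ PySem.Str.join sep l := by
  obtain ⟨q, t, rfl⟩ := List.exists_cons_of_ne_nil h
  rw [← String.toList_inj]
  simp [PySem.Str.toList_join, PySem.Chars.join_cons_cons]

theorem pv_join_snoc (sep : String) (l : List String) (w : String) (h : l ≠ []) :
    PySem.Str.join sep (l ++ [w]) = PySem.Str.join sep l ++ sep ++ w := by
  induction l with
  | nil => exact absurd rfl h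
  | cons a t ih =>
    cases t with
    | nil => simp [pv_join_cons sep a [w] (by simp), pv_join_singleton]
    | cons b t' =>
      rw [List.cons_append, pv_join_cons sep a ((b :: t') ++ [w]) (by simp),
        ih (by simp), pv_join_cons sep a (b :: t') (by simp)]
      simp [String.append_assoc]

theorem pv_drop_len_takeWhile {α : Type} (p : α → Bool) (l : List α) :
    l.drop (l.takeWhile p).length = l.dropWhile p := by
  have h2 : List.drop (l.takeWhile p).length (l.takeWhile p ++ l.dropWhile p) = l.dropWhile p :=
    List.drop_left
  rw [List.takeWhile_append_dropWhile] at h2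
  exact h2

theorem pv_joinOpt_cons (sep w : String) (l : List String) :
    pvJoinOpt sep (w :: l) = some (match pvJoinOpt sep l with | none => w | some s => w ++ sep ++ s) := by
  cases l with
  | nil => simp [pvJoinOpt, pv_join_singleton]
  | cons b t => simp [pvJoinOpt, pv_join_cons sep w (b :: t) (by simp)]

theorem pv_bright_spec (sep : String) (ct : List String) (s : List String) :
    pvBright sep ct s =
      (pvJoinOpt sep s, s.takeWhile (fun w => ct.contains w),
       pvJoinOpt sep (s.dropWhile (fun w => ct.contains w)), pvTails sep ct s) := by
  induction s with
  | nil => simp [pvBright, pvJoinOpt, pvTails]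
  | cons w rest ih =>
    rw [pvBright, ih]
    by_cases hw : ct.contains w = true
    · cases hd : pvJoinOpt sep (rest.dropWhile (fun w => ct.contains w)) with
      | none => simp only [hw, ite_true, pvTails, pvPart, pv_joinOpt_cons, hd,
          List.takeWhile_cons_of_pos, List.dropWhile_cons_of_pos, Option.toList_none,
          List.append_nil]
      | some t => simp only [hw, ite_true, pvTails, pvPart, pv_joinOpt_cons, hd,
          List.takeWhile_cons_of_pos, List.dropWhile_cons_of_pos, Option.toList_some,
          List.cons_append]
    · simp only [hw, ite_false, Bool.false_eq_true, pvTails, pvPart, pv_joinOpt_cons,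
        List.takeWhile_cons_of_neg, List.dropWhile_cons_of_neg, not_false_iff,
        Option.toList_some, List.nil_append]

theorem pv_bleft_spec (sep : String) (ct : List String) (r : List String) :
    ∀ (prev pfx : String) (acc : List (List String)),
      pvBleft sep ct (r.zip (pvTails sep ct r)) prev pfx acc = acc ++ pvMid sep ct prev pfx r := by
  induction r with
  | nil => intro prev pfx acc; simp [pvTails, pvBleft, pvMid]
  | cons w rest ih =>
    intro prev pfx acc
    rw [pvTails, List.zip_cons_cons, pvBleft, ih, pvMid]
    by_cases hp : ct.contains prev = true
    · rw [if_pos hp, if_pos hp]; simp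
    · rw [if_neg hp, if_neg hp]; simp

theorem pv_aloop_spec (sep : String) (ct : List String) (u : List String) :
    ∀ (n i : Nat), u.length - i = n → 1 ≤ i →
      pvAloop sep ct u i = pvMid sep ct (u.getD (i - 1) "") (PySem.Str.join sep (u.take i)) (u.drop i) := by
  intro n
  induction n with
  | zero =>
    intro i hn hi
    have hle : u.length ≤ i := by omega
    rw [pvAloop, dif_neg (by omega), List.drop_eq_nil_of_le hle, pvMid]
  | succ m ih =>
    intro i hn hi
    have hlt : i < u.length := by omega
    have hrec : pvAloop sep ct u (i + 1)
        = pvMid sep ct (u.getD i "") (PySem.Str.join sep (u.take (i + 1))) (u.drop (i + 1)) := by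
      have := ih (i + 1) (by omega) (by omega)
      simpa using this
    have hgetD : u.getD i "" = u[i] := List.getD_eq_getElem u "" hlt
    have htake : PySem.Str.join sep (u.take (i + 1)) = PySem.Str.join sep (u.take i) ++ sep ++ u[i] := by
      rw [List.take_add_one, List.getElem?_eq_getElem hlt]
      exact pv_join_snoc sep (u.take i) u[i] (by
        intro hnil
        have : (u.take i).length = 0 := by rw [hnil]; rfl
        rw [List.length_take] at this
        omega)
    have htail : u.drop (i + ((u.drop i).takeWhile (fun w => ct.contains w)).length)
        = (u.drop i).dropWhile (fun w => ct.contains w) := by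
      rw [← pv_drop_len_takeWhile (fun w => ct.contains w) (u.drop i), List.drop_drop]
    rw [pvAloop, dif_pos hlt, hrec, hgetD, htake]
    conv_rhs => rw [List.drop_eq_getElem_cons hlt, pvMid, ← List.drop_eq_getElem_cons hlt]
    congr 1
    simp only [htail]
    split_ifs with hc h2
    · rfl
    · obtain ⟨a, t, he⟩ := List.exists_cons_of_ne_nil h2
      rw [pvPart, he]
      simp [pvJoinOpt]
    · rw [not_ne_iff] at h2
      rw [pvPart, h2]
      simp [pvJoinOpt]

theorem pv_key_eq (sep : String) (ct : List String) (acc : List (List String)) (u0 : String) (rest : List String) :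
    acc ++ pvAloop sep ct (u0 :: rest) 1
      = pvBleft sep ct (rest.zip (pvBright sep ct rest).2.2.2) u0 u0 acc := by
  rw [pv_bright_spec, pv_bleft_spec]
  congr 1
  have h1 := pv_aloop_spec sep ct (u0 :: rest) ((u0 :: rest).length - 1) 1 rfl (by omega)
  rw [h1]
  simp [pv_join_singleton]

theorem pv_fold_eq (sep : String) (ct : List String) (sv : List String) :
    ∀ acc, sv.foldl (fun acc k =>
        if PySem.Str.isIn sep k = false then acc
        else match PySem.Str.split? k sep with
          | none => acc
          | some u => acc ++ pvAloop sep ct u 1) acc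
      = sv.foldl (fun acc k =>
        if PySem.Str.isIn sep k = false then acc
        else match PySem.Str.split? k sep with
          | none => acc
          | some [] => acc
          | some (u0 :: rest) => pvBleft sep ct (rest.zip (pvBright sep ct rest).2.2.2) u0 u0 acc) acc := by
  induction sv with
  | nil => intro acc; rfl
  | cons k sv ih =>
    intro acc
    rw [List.foldl_cons, List.foldl_cons, ih]
    congr 1
    by_cases hin : PySem.Str.isIn sep k = false
    · rw [if_pos hin, if_pos hin]
    · rw [if_neg hin, if_neg hin]
      cases hs : PySem.Str.split? k sep with
      | none => rfl
      | some u =>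
        cases u with
        | nil =>
          show acc ++ pvAloop sep ct [] 1 = acc
          rw [pvAloop, dif_neg (by simp)]
          exact List.append_nil acc
        | cons u0 rest => exact pv_key_eq sep ct acc u0 rest

-- ===== VERDICT (by name: the statement is the Claim_ definition above) =====
theorem pseudocorpus_spec : Claim_equal_pseudocorpus := by
  intro sv sep ct _ _
  unfold Spec_pseudocorpus pseudocorpus pseudocorpus_alt
  exact pv_fold_eq sep ct sv []
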